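-- pv_equiv track=rewrite | github.com/jpizagno/adventofcode2020 | day5/highest_seat_1.py | _get_element_code
-- ===== SOURCE A (Python) =====
-- def _get_element_code(code: str, rows:[int]):
--     """code=FBFBBFFRLR and range=[0,1,2,3,4,5,...,127]"""
--     if len(rows)==1:
--         return rows[0]
--     else:
--         if code[0]=='F' or code[0]=='L':
--             # get front
--             return _get_element_code(code[1:], rows[:len(rows)//2])
--         else:
--             # ForB='B'
--             return _get_element_code(code[1:], rows[len(rows)//2:])
-- ===== SOURCE B (Python) =====
-- def _get_element_code(code: str, rows:[int]):
--     """Iterative: track [lo, hi) index window into rows instead of slicing lists."""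
--     lo, hi = 0, len(rows)
--     i = 0
--     while hi - lo > 1:
--         mid = lo + (hi - lo) // 2
--         if code[i] == 'F' or code[i] == 'L':
--             hi = mid
--         else:
--             lo = mid
--         i += 1
--     return rows[lo]
-- ===== Notes on version B (the rewrite author's own statement) =====
-- stated objective: faster
-- what changed: Replaces A's recursion that copies half of both the code string and the rows list at every step with a single iterative loop that only moves two indices (lo, hi) over the untouched rows list and an index into code.
import Mathlib
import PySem

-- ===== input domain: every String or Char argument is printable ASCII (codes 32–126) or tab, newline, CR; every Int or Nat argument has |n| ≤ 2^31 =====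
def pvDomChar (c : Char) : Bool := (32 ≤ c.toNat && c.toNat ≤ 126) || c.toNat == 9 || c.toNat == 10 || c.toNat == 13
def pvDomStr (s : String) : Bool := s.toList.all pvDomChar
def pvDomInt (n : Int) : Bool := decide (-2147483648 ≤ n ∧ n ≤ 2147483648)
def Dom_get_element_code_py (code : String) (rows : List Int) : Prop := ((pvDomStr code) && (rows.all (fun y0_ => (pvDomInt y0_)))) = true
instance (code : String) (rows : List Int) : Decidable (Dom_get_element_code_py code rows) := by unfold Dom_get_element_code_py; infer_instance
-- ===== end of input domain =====

-- B replaces A's recursion (which copies half of code and rows at every level) by one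
-- iterative loop moving two indices (lo, hi) over the untouched rows list: faster.

-- ===== PORT A =====
-- literal transliteration of A's recursion; recursion is structural on the code
-- (Python's code[1:] at each call). The `[] => 0` arm is Python's IndexError on
-- code[0] (outside Pre_); `.getD 0` on rows[0] likewise never defaults under Pre_.
def goA : List Char → List Int → Int
  | cs, rows =>
    if rows.length = 1 then
      (PySem.List.pyGet? rows 0).getD 0
    else
      match cs with
      | [] => 0
      | c :: rest =>
        if c = 'F' ∨ c = 'L' then
          goA rest (PySem.List.slice rows none (some (PySem.Int.floordiv rows.length 2)))
        else
          goA rest (PySem.List.slice rows (some (PySem.Int.floordiv rows.length 2)) none)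

def get_element_code_py (code : String) (rows : List Int) : Int :=
  goA code.toList rows

-- ===== PORT B =====
-- literal transliteration of B's while-loop; `none => 0` is Python's IndexError on
-- code[i] (outside Pre_); `.getD 0` on rows[lo] likewise never defaults under Pre_.
def goB (cs : List Char) (rows : List Int) (lo hi i : Nat) : Int :=
  if hi - lo > 1 then
    match cs[i]? with
    | none => 0
    | some c =>
      let mid := lo + (hi - lo) / 2
      if c = 'F' ∨ c = 'L' then
        goB cs rows lo mid (i + 1)
      else
        goB cs rows mid hi (i + 1)
  else
    (PySem.List.pyGet? rows lo).getD 0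
termination_by hi - lo
decreasing_by all_goals omega

def get_element_code_py_alt (code : String) (rows : List Int) : Int :=
  goB code.toList rows 0 rows.length 0

-- ===== PRECONDITION & SPEC =====
-- codeBit maps a code letter to its binary digit (F/L = front = 0, anything else = back = 1);
-- the window size after k partition steps is exactly
-- (rows.length + value of the first k digits in base 2, little-endian) / 2^k.
def codeBit (c : Char) : Nat := if c = 'F' ∨ c = 'L' then 0 else 1

-- Pre_ is EXACTLY the set of inputs on which A returns: the partition window reaches
-- size 1 within len(code) steps; on every other input A (and B) raises IndexError
-- (code exhausted before the window shrinks to one element, incl. empty rows).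
def Pre_get_element_code_py (code : String) (rows : List Int) : Prop :=
  ∃ k ≤ code.toList.length,
    (rows.length + Nat.ofDigits 2 ((code.toList.take k).map codeBit)) / 2 ^ k = 1
instance (code : String) (rows : List Int) : Decidable (Pre_get_element_code_py code rows) := by
  unfold Pre_get_element_code_py; infer_instance

def pvWitness_get_element_code_py : String × List Int := ("FB", [10, 20, 30])

def Spec_get_element_code_py (code : String) (rows : List Int) (out : Int) : Prop := out = get_element_code_py_alt code rows
instance (code : String) (rows : List Int) (out : Int) : Decidable (Spec_get_element_code_py code rows out) := by unfold Spec_get_element_code_py; infer_instance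

-- ===== CLAIM (what is proved, stated in full; the proofs are below) =====
def Claim_equal_get_element_code_py : Prop := ∀ (code : String) (rows : List Int), Dom_get_element_code_py code rows → Pre_get_element_code_py code rows → Spec_get_element_code_py code rows (get_element_code_py code rows)

-- ===== LEMMAS AND PROOFS =====

lemma bitsVal_lt (l : List Char) : Nat.ofDigits 2 (l.map codeBit) < 2 ^ l.length := by
  induction l with
  | nil => simp
  | cons c rest ih =>
    have hle : codeBit c ≤ 1 := by unfold codeBit; split_ifs <;> omega
    simp only [List.map_cons, Nat.ofDigits_cons, List.length_cons, pow_succ]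
    omega

lemma eqAux (cs : List Char) (rows : List Int) (lo hi i : Nat)
    (h1 : lo < hi) (h2 : hi ≤ rows.length)
    (hterm : ∃ k ≤ cs.length - i,
      (hi - lo + Nat.ofDigits 2 (((cs.drop i).take k).map codeBit)) / 2 ^ k = 1) :
    goA (cs.drop i) ((rows.drop lo).take (hi - lo)) = goB cs rows lo hi i := by
  have hseglen : ((rows.drop lo).take (hi - lo)).length = hi - lo := by
    simp [List.length_take, List.length_drop]; omega
  by_cases hd : hi - lo = 1
  · -- window of size one: both return rows[lo]
    have hlo : lo < rows.length := by omega
    have hseg : (rows.drop lo).take (hi - lo) = [rows[lo]] := by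
      rw [hd, List.drop_eq_getElem_cons hlo, List.take_succ_cons, List.take_zero]
    rw [hseg, goA.eq_def, goB]
    simp [hd, PySem.List.pyGet?, PySem.List.pyIdx?, hlo]
  · have hd2 : 2 ≤ hi - lo := by omega
    obtain ⟨k, hk, hdiv⟩ := hterm
    have hk1 : 1 ≤ k := by
      by_contra h
      have : k = 0 := by omega
      simp [this] at hdiv; omega
    have hicode : i < cs.length := by omega
    have hdropCs : cs.drop i = cs[i] :: cs.drop (i + 1) := List.drop_eq_getElem_cons hicode
    -- unfold one step of bitsVal on the k-prefix of the remaining code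
    have htake : (cs.drop i).take k = cs[i] :: (cs.drop (i + 1)).take (k - 1) := by
      rw [hdropCs]
      have hke : k = (k - 1) + 1 := by omega
      rw [hke, List.take_succ_cons]
      simp
    have hpow : 2 ^ k = 2 * 2 ^ (k - 1) := by
      cases k with
      | zero => omega
      | succ n => simp [pow_succ]; ring
    rw [goA.eq_def, goB]
    have hgt : hi - lo > 1 := by omega
    simp only [hdropCs, hseglen, hd, if_false, hgt, if_true, List.getElem?_eq_getElem hicode]
    have hflo : PySem.Int.floordiv ((hi - lo : Nat) : Int) 2 = (((hi - lo) / 2 : Nat) : Int) := by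
      exact_mod_cast PySem.Int.floordiv_natCast (hi - lo) 2
    set m := Nat.ofDigits 2 ((((cs.drop (i + 1)).take (k - 1))).map codeBit) with hm
    by_cases hc : cs[i] = 'F' ∨ cs[i] = 'L'
    · -- front half: new size (hi-lo)/2
      simp only [hc, if_true]
      have hdiv' : (hi - lo + Nat.ofDigits 2 (((cs.drop i).take k).map codeBit))
          = hi - lo + 2 * m := by
        rw [htake, List.map_cons, Nat.ofDigits_cons]; simp [codeBit, hc, hm]
      rw [hdiv'] at hdiv
      have hnew : ((hi - lo) / 2 + m) / 2 ^ (k - 1) = 1 := by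
        have e1 : (hi - lo) / 2 + m = (hi - lo + 2 * m) / 2 := by omega
        rw [e1, Nat.div_div_eq_div_mul]
        rw [show 2 * 2 ^ (k - 1) = 2 ^ k from hpow.symm]
        exact hdiv
      have hslice : PySem.List.slice ((rows.drop lo).take (hi - lo)) none
          (some (PySem.Int.floordiv ((hi - lo : Nat) : Int) 2))
          = (rows.drop lo).take ((hi - lo) / 2) := by
        rw [hflo, PySem.List.slice_to_natCast, List.take_take]
        congr 1; omega
      rw [hslice]
      have := eqAux cs rows lo (lo + (hi - lo) / 2) (i + 1)
        (by omega) (by omega)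
        ⟨k - 1, by omega, by
          have harg : lo + (hi - lo) / 2 - lo = (hi - lo) / 2 := by omega
          rw [harg]; exact hnew⟩
      have harg : lo + (hi - lo) / 2 - lo = (hi - lo) / 2 := by omega
      rw [harg] at this
      exact this
    · -- back half: new size (hi-lo) - (hi-lo)/2
      simp only [hc, if_false]
      have hdiv' : (hi - lo + Nat.ofDigits 2 (((cs.drop i).take k).map codeBit))
          = hi - lo + (1 + 2 * m) := by
        rw [htake, List.map_cons, Nat.ofDigits_cons]; simp [codeBit, hc, hm]
      rw [hdiv'] at hdiv
      have hnew : (hi - (lo + (hi - lo) / 2) + m) / 2 ^ (k - 1) = 1 := by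
        have e1 : hi - (lo + (hi - lo) / 2) + m = (hi - lo + (1 + 2 * m)) / 2 := by omega
        rw [e1, Nat.div_div_eq_div_mul]
        rw [show 2 * 2 ^ (k - 1) = 2 ^ k from hpow.symm]
        exact hdiv
      have hslice : PySem.List.slice ((rows.drop lo).take (hi - lo))
          (some (PySem.Int.floordiv ((hi - lo : Nat) : Int) 2)) none
          = (rows.drop (lo + (hi - lo) / 2)).take (hi - (lo + (hi - lo) / 2)) := by
        rw [hflo, PySem.List.slice_from_natCast, List.drop_take, List.drop_drop]
        congr 1; omega
      rw [hslice]
      exact eqAux cs rows (lo + (hi - lo) / 2) hi (i + 1)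
        (by omega) (by omega) ⟨k - 1, by omega, hnew⟩
termination_by hi - lo
decreasing_by all_goals omega

-- ===== VERDICT (by name: the statement is the Claim_ definition above) =====
theorem get_element_code_py_spec : Claim_equal_get_element_code_py := by
  intro code rows _ hpre
  obtain ⟨k, hk, hdiv⟩ := hpre
  unfold Spec_get_element_code_py get_element_code_py get_element_code_py_alt
  have hpos : 0 < rows.length := by
    by_contra h
    have hr0 : rows.length = 0 := by omega
    have hb : Nat.ofDigits 2 ((code.toList.take k).map codeBit) < 2 ^ k := by
      calc Nat.ofDigits 2 ((code.toList.take k).map codeBit)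
          < 2 ^ (code.toList.take k).length := bitsVal_lt _
        _ ≤ 2 ^ k := Nat.pow_le_pow_right (by norm_num) (by simp [List.length_take])
    rw [hr0, Nat.zero_add] at hdiv
    have : Nat.ofDigits 2 ((code.toList.take k).map codeBit) / 2 ^ k = 0 := Nat.div_eq_of_lt hb
    omega
  have := eqAux code.toList rows 0 rows.length 0 hpos le_rfl
    ⟨k, by simpa using hk, by simpa using hdiv⟩
  simpa using this
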